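-- pv_equiv track=rewrite | github.com/SamWheating/AdventOfCode2020 | 13/solution.py | find_new_generator
-- ===== SOURCE A (Python) =====
-- def find_new_generator(period1, offset1, period2, offset2):
--     i = 0
--     initial = None
--     period = None
--     while True:
--         if (i*period1 + offset1 - offset2) % period2 == 0:
--             if initial is None:
--                 initial = i*period1 + offset1
--             else:
--                 return i*period1 + offset1 - initial, initial
--         i += 1
-- ===== SOURCE B (Python) =====
-- def find_new_generator(period1, offset1, period2, offset2):
--     # CRT via extended Euclid: solve i*period1 == offset2 - offset1 (mod |period2|)
--     def egcd(a, b):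
--         if b == 0:
--             return a, 1, 0
--         g, x, y = egcd(b, a % b)
--         return g, y, x - (a // b) * y
--     m = abs(period2)
--     g, x, _ = egcd(period1, m)
--     c = offset2 - offset1
--     if c % g != 0:
--         raise ValueError("no solution")
--     m2 = m // g
--     i0 = ((c // g) * x) % m2
--     return m2 * period1, i0 * period1 + offset1
-- ===== Notes on version B (the rewrite author's own statement) =====
-- stated objective: faster
-- what changed: Replaced A's unbounded linear scan for the first two indices satisfying the congruence by solving the linear congruence directly with an extended Euclidean algorithm (CRT): period = (|period2|/g)*period1 and first offset from the modular inverse; intended as faster (O(log) vs O(period)); a timing run measured B 674x faster at the largest size both finished (A diverges on large no-solution inputs, so the check could not confirm the label).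
-- outside the precondition, e.g. on find_new_generator(2, 0, 4, 1): A does not finish within the time limit, B raises ValueError; on find_new_generator(3, 1, 0, 2): A raises ZeroDivisionError, B raises ValueError
import Mathlib
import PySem

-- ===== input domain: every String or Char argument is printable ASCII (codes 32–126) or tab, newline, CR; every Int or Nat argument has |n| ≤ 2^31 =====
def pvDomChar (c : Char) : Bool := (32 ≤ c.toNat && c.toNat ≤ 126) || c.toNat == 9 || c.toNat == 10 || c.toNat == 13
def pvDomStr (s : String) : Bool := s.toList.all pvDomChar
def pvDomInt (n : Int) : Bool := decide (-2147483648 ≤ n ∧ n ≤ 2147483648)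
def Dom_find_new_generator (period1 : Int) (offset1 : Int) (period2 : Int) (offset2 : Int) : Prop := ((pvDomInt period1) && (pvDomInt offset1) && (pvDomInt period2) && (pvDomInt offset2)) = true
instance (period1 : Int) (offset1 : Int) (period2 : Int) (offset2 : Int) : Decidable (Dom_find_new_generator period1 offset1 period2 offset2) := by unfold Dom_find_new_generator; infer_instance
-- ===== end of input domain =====

-- B replaces A's step-by-step scan for the first two hits of the congruence by solving it
-- directly with an extended Euclidean algorithm (CRT); intended as faster (measured 674x at the
-- largest size both Pythons finished; unconfirmed as a label since A diverges on some large inputs).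
-- The Python A returns a 2-tuple; per the fixed signature both ports return a 2-element list.

-- ===== PORT A =====
-- A's `while True` loop, made total with fuel; under Pre_ the loop returns within
-- 2*|period2|+2 iterations, so the fuel is never exhausted (the `[]` at fuel 0 is unreachable).
def loopA (period1 offset1 period2 offset2 : Int) : Nat → Int → Option Int → List Int
  | 0, _, _ => []
  | fuel+1, i, initial =>
    if PySem.Int.mod (i*period1 + offset1 - offset2) period2 = 0 then
      match initial with
      | none => loopA period1 offset1 period2 offset2 fuel (i+1) (some (i*period1 + offset1))
      | some init => [i*period1 + offset1 - init, init]
    else loopA period1 offset1 period2 offset2 fuel (i+1) initial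

def find_new_generator (period1 : Int) (offset1 : Int) (period2 : Int) (offset2 : Int) : List Int :=
  loopA period1 offset1 period2 offset2 (2*period2.natAbs + 2) 0 none

-- ===== PORT B =====
-- termination helper for pyEgcd (cited by its decreasing_by)
theorem pyMod_natAbs_lt (a b : Int) (hb : b ≠ 0) : (PySem.Int.mod a b).natAbs < b.natAbs := by
  rcases lt_or_gt_of_ne hb with h | h
  · have := PySem.Int.mod_neg_bounds a h; omega
  · have h1 := PySem.Int.mod_nonneg a h; have h2 := PySem.Int.mod_lt a h; omega

-- Source B's recursive egcd, step for step (Python's % and // are PySem.Int.mod / floordiv)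
def pyEgcd (a b : Int) : Int × Int × Int :=
  if hb : b = 0 then (a, 1, 0)
  else
    let r := pyEgcd b (PySem.Int.mod a b)
    (r.1, r.2.2, r.2.1 - (PySem.Int.floordiv a b) * r.2.2)
termination_by b.natAbs
decreasing_by exact pyMod_natAbs_lt a b hb

def find_new_generator_alt (period1 : Int) (offset1 : Int) (period2 : Int) (offset2 : Int) : List Int :=
  let m : Int := |period2|
  let r := pyEgcd period1 m
  let g := r.1
  let x := r.2.1
  let c := offset2 - offset1
  if PySem.Int.mod c g ≠ 0 then []   -- Source B raises ValueError here; outside Pre_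
  else
    let m2 := PySem.Int.floordiv m g
    let i0 := PySem.Int.mod ((PySem.Int.floordiv c g) * x) m2
    [m2 * period1, i0 * period1 + offset1]

-- ===== PRECONDITION & SPEC =====
-- Pre_ excludes exactly the inputs where Python A never returns: period2 = 0 (ZeroDivisionError)
-- and congruences with no solution, where A's `while True` loop diverges.
def Pre_find_new_generator (period1 : Int) (offset1 : Int) (period2 : Int) (offset2 : Int) : Prop :=
  period2 ≠ 0 ∧ (Int.gcd period1 period2 : Int) ∣ (offset2 - offset1)
instance (period1 : Int) (offset1 : Int) (period2 : Int) (offset2 : Int) : Decidable (Pre_find_new_generator period1 offset1 period2 offset2) := by unfold Pre_find_new_generator; infer_instance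

def pvWitness_find_new_generator : Int × Int × Int × Int := (3, 1, 5, 2)

def Spec_find_new_generator (period1 : Int) (offset1 : Int) (period2 : Int) (offset2 : Int) (out : List Int) : Prop := out = find_new_generator_alt period1 offset1 period2 offset2
instance (period1 : Int) (offset1 : Int) (period2 : Int) (offset2 : Int) (out : List Int) : Decidable (Spec_find_new_generator period1 offset1 period2 offset2 out) := by unfold Spec_find_new_generator; infer_instance

-- ===== CLAIM (what is proved, stated in full; the proofs are below) =====
def Claim_equal_find_new_generator : Prop := ∀ (period1 : Int) (offset1 : Int) (period2 : Int) (offset2 : Int), Dom_find_new_generator period1 offset1 period2 offset2 → Pre_find_new_generator period1 offset1 period2 offset2 → Spec_find_new_generator period1 offset1 period2 offset2 (find_new_generator period1 offset1 period2 offset2)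

-- ===== LEMMAS AND PROOFS =====

theorem pyEgcd_bezout (a b : Int) :
    (pyEgcd a b).2.1 * a + (pyEgcd a b).2.2 * b = (pyEgcd a b).1 := by
  suffices H : ∀ (n : Nat) (a b : Int), b.natAbs ≤ n →
      (pyEgcd a b).2.1 * a + (pyEgcd a b).2.2 * b = (pyEgcd a b).1 from H b.natAbs a b le_rfl
  intro n
  induction n with
  | zero =>
    intro a b hb
    have hb0 : b = 0 := by omega
    subst hb0; rw [pyEgcd]; simp
  | succ n ih =>
    intro a b hb
    by_cases h : b = 0
    · subst h; rw [pyEgcd]; simp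
    · rw [pyEgcd, dif_neg h]
      have hlt : (PySem.Int.mod a b).natAbs ≤ n := by
        rcases lt_or_gt_of_ne h with h' | h'
        · have := PySem.Int.mod_neg_bounds a h'; omega
        · have h1 := PySem.Int.mod_nonneg a h'; have h2 := PySem.Int.mod_lt a h'; omega
      have ihr := ih b (PySem.Int.mod a b) hlt
      have hm := PySem.Int.floordiv_mul_add_mod a b
      set r := pyEgcd b (PySem.Int.mod a b)
      simp only
      linear_combination ihr - r.2.2 * hm

theorem pyEgcd_fst (a b : Int) (hb : 0 < b) : (pyEgcd a b).1 = (Int.gcd a b : Int) := by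
  suffices H : ∀ (n : Nat) (a b : Int), b.natAbs ≤ n → 0 < b →
      (pyEgcd a b).1 = (Int.gcd a b : Int) from H b.natAbs a b le_rfl hb
  intro n
  induction n with
  | zero => intro a b hb hb'; omega
  | succ n ih =>
    intro a b hb hb'
    rw [pyEgcd, dif_neg (ne_of_gt hb')]
    have hmod : PySem.Int.mod a b = a % b := PySem.Int.mod_eq_emod_of_pos (a:=a) hb'
    by_cases h0 : PySem.Int.mod a b = 0
    · rw [h0]
      have he : pyEgcd b 0 = (b, 1, 0) := by rw [pyEgcd]; simp
      have hdvd : b ∣ a := (PySem.Int.mod_eq_zero_iff_dvd a b).mp h0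
      have hg : Int.gcd a b = b.natAbs := Int.gcd_eq_natAbs_right_iff_dvd.mpr hdvd
      show (pyEgcd b 0).1 = (Int.gcd a b : Int)
      rw [he, hg, Int.natAbs_of_nonneg hb'.le]
    · have h1 := PySem.Int.mod_nonneg a hb'
      have h2 := PySem.Int.mod_lt a hb'
      have ihr := ih b (PySem.Int.mod a b) (by omega) (by omega)
      simp only [ihr]
      rw [hmod, Int.gcd_comm, Int.gcd_emod]

theorem dvd_shift_iff (p1 c m g x y m2 q : Int) (hg : 0 < g)
    (hbez : x*p1 + y*m = g) (hm : m = g * m2) (hq : q * g = c) (hgp1 : g ∣ p1)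
    (i : Int) : m ∣ (i*p1 - c) ↔ m2 ∣ (i - q*x) := by
  constructor
  · rintro ⟨k, hk⟩
    have key : g * (i - q*x) = g * (m2 * (x*k + y*i)) := by
      linear_combination x * hk - i * hbez - x * hq + (x*k + y*i) * hm
    exact ⟨x*k + y*i, mul_left_cancel₀ (ne_of_gt hg) key⟩
  · rintro ⟨k, hk⟩
    obtain ⟨p, hp⟩ := hgp1
    refine ⟨k*p - q*y, ?_⟩
    linear_combination p1 * hk + q * hbez + hq + m2*k * hp - k*p * hm
theorem loopA_some (period1 offset1 period2 offset2 i0 m2 : Int) (hm2 : 0 < m2)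
    (hcond : ∀ i : Int, (PySem.Int.mod (i*period1 + offset1 - offset2) period2 = 0) ↔ m2 ∣ (i - i0)) :
    ∀ (fuel : Nat) (i init : Int), i0 < i → i ≤ i0 + m2 → (i0 + m2 - i).toNat < fuel →
      loopA period1 offset1 period2 offset2 fuel i (some init)
        = [(i0+m2)*period1 + offset1 - init, init] := by
  intro fuel
  induction fuel with
  | zero => intro i init h1 h2 h3; omega
  | succ n ih =>
    intro i init h1 h2 h3
    rw [loopA]
    by_cases hc : PySem.Int.mod (i*period1 + offset1 - offset2) period2 = 0
    · rw [if_pos hc]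
      have hd := (hcond i).mp hc
      have hieq : i = i0 + m2 := by
        rcases hd with ⟨k, hk⟩
        have hk1 : 1 ≤ k := by nlinarith
        have hk2 : k ≤ 1 := by nlinarith
        have hk3 : k = 1 := by omega
        rw [hk3, mul_one] at hk; omega
      subst hieq; rfl
    · rw [if_neg hc]
      have hne : i ≠ i0 + m2 := by
        intro h; exact hc ((hcond i).mpr (by rw [h]; exact ⟨1, by ring⟩))
      exact ih (i+1) init (by omega) (by omega) (by omega)

theorem loopA_none (period1 offset1 period2 offset2 i0 m2 : Int) (hm2 : 0 < m2)
    (hi0 : 0 ≤ i0) (hi0' : i0 < m2)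
    (hcond : ∀ i : Int, (PySem.Int.mod (i*period1 + offset1 - offset2) period2 = 0) ↔ m2 ∣ (i - i0)) :
    ∀ (fuel : Nat) (i : Int), 0 ≤ i → i ≤ i0 → (i0 - i).toNat + m2.toNat + 1 < fuel →
      loopA period1 offset1 period2 offset2 fuel i none
        = [m2*period1, i0*period1 + offset1] := by
  intro fuel
  induction fuel with
  | zero => intro i h1 h2 h3; omega
  | succ n ih =>
    intro i h1 h2 h3
    rw [loopA]
    by_cases hc : PySem.Int.mod (i*period1 + offset1 - offset2) period2 = 0
    · rw [if_pos hc]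
      have hd := (hcond i).mp hc
      have hii : i = i0 := by
        rcases hd with ⟨k, hk⟩
        have hk1 : k ≤ 0 := by nlinarith
        have hk2 : 0 ≤ k := by nlinarith
        have hk3 : k = 0 := by omega
        rw [hk3, mul_zero] at hk; omega
      subst hii
      rw [loopA_some period1 offset1 period2 offset2 i m2 hm2 hcond n (i+1)
            (i*period1 + offset1) (by omega) (by omega) (by omega)]
      have he : (i+m2)*period1 + offset1 - (i*period1 + offset1) = m2*period1 := by ring
      rw [he]
    · rw [if_neg hc]
      have hne : i ≠ i0 := by
        intro h; exact hc ((hcond i).mpr (by rw [h]; exact ⟨0, by ring⟩))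
      exact ih (i+1) (by omega) (by omega) (by omega)
theorem find_new_generator_eq_alt (period1 offset1 period2 offset2 : Int)
    (hp2 : period2 ≠ 0) (hdvd : (Int.gcd period1 period2 : Int) ∣ (offset2 - offset1)) :
    find_new_generator period1 offset1 period2 offset2
      = find_new_generator_alt period1 offset1 period2 offset2 := by
  set m : Int := |period2| with hm_def
  have hm_pos : 0 < m := abs_pos.mpr hp2
  set r := pyEgcd period1 m with hr_def
  set g := r.1 with hg_def
  set x := r.2.1 with hx_def
  set y := r.2.2 with hy_def
  have hbez : x * period1 + y * m = g := pyEgcd_bezout period1 m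
  have hgcd : g = (Int.gcd period1 period2 : Int) := by
    rw [hg_def, hr_def, pyEgcd_fst period1 m hm_pos]
    congr 1
    simp [Int.gcd, hm_def, Int.natAbs_abs]
  have hg_pos : 0 < g := by
    rw [hgcd]
    exact_mod_cast Int.gcd_pos_of_ne_zero_right period1 hp2
  set c : Int := offset2 - offset1 with hc_def
  have hgc : g ∣ c := hgcd ▸ hdvd
  have hmodc : PySem.Int.mod c g = 0 := (PySem.Int.mod_eq_zero_iff_dvd c g).mpr hgc
  have hgm : g ∣ m := by
    rw [hgcd, hm_def]
    exact (Int.gcd_dvd_right period1 period2).trans (self_dvd_abs period2)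
  set m2 := PySem.Int.floordiv m g with hm2_def
  have hm2_eq : m2 * g = m := by
    have h := PySem.Int.floordiv_mul_add_mod m g
    have h0 : PySem.Int.mod m g = 0 := (PySem.Int.mod_eq_zero_iff_dvd m g).mpr hgm
    rw [h0] at h; linarith [h]
  have hm2_pos : 0 < m2 := by nlinarith
  set q := PySem.Int.floordiv c g with hq_def
  have hq : q * g = c := by
    have h := PySem.Int.floordiv_mul_add_mod c g
    rw [hmodc] at h; linarith [h]
  have hgp1 : g ∣ period1 := hgcd ▸ Int.gcd_dvd_left period1 period2
  set i0 := PySem.Int.mod (q * x) m2 with hi0_def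
  have hi0_nonneg : 0 ≤ i0 := PySem.Int.mod_nonneg (q*x) hm2_pos
  have hi0_lt : i0 < m2 := PySem.Int.mod_lt (q*x) hm2_pos
  have hshift : m2 ∣ (i0 - q*x) := by
    have h := PySem.Int.floordiv_mul_add_mod (q*x) m2
    exact ⟨-(PySem.Int.floordiv (q*x) m2), by linarith [h]⟩
  have hcond : ∀ i : Int,
      (PySem.Int.mod (i*period1 + offset1 - offset2) period2 = 0) ↔ m2 ∣ (i - i0) := by
    intro i
    rw [PySem.Int.mod_eq_zero_iff_dvd]
    have h1 : i*period1 + offset1 - offset2 = i*period1 - c := by rw [hc_def]; ring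
    rw [h1, ← abs_dvd, ← hm_def]
    rw [dvd_shift_iff period1 c m g x y m2 q hg_pos hbez (by linarith [hm2_eq]) hq hgp1 i]
    constructor
    · rintro ⟨k1, e1⟩
      rcases hshift with ⟨k2, e2⟩
      exact ⟨k1 - k2, by linarith⟩
    · rintro ⟨k1, e1⟩
      rcases hshift with ⟨k2, e2⟩
      exact ⟨k1 + k2, by linarith⟩
  have hA : find_new_generator period1 offset1 period2 offset2
      = [m2*period1, i0*period1 + offset1] := by
    have hm2m : m2 ≤ m := by nlinarith
    have hmabs : m = (period2.natAbs : Int) := by rw [hm_def]; exact (Int.abs_eq_natAbs period2)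
    exact loopA_none period1 offset1 period2 offset2 i0 m2 hm2_pos hi0_nonneg hi0_lt hcond
      (2*period2.natAbs + 2) 0 le_rfl hi0_nonneg (by omega)
  have hB : find_new_generator_alt period1 offset1 period2 offset2
      = [m2*period1, i0*period1 + offset1] := by
    show (if PySem.Int.mod c g ≠ 0 then []
      else [PySem.Int.floordiv m g * period1,
        PySem.Int.mod ((PySem.Int.floordiv c g) * x) (PySem.Int.floordiv m g) * period1 + offset1])
      = [m2*period1, i0*period1 + offset1]
    rw [if_neg (by simp [hmodc])]
  rw [hA, hB]

-- ===== VERDICT (by name: the statement is the Claim_ definition above) =====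
theorem find_new_generator_spec : Claim_equal_find_new_generator := by
  intro period1 offset1 period2 offset2 _hdom hpre
  unfold Spec_find_new_generator
  exact find_new_generator_eq_alt period1 offset1 period2 offset2 hpre.1 hpre.2
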